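-- pv_equiv track=rewrite | github.com/mixedbread-ai/ofen | ofen/common/utils.py | bucket_batch_iter
-- ===== SOURCE A (Python) =====
-- from collections.abc import Awaitable, Generator, Iterable, Sequence
-- from typing import Any, Callable, TypeVar, get_type_hints
--
-- T = TypeVar("T")
--
-- def batch_iter(seq: Sequence[T], batch_size: int) -> Generator[Sequence[T], None, None]:
--     """Yield batches from a sequence.
--
--     Args:
--         seq (Sequence[T]): The sequence to batch.
--         batch_size (int): The size of each batch.
--
--     Yields:
--         Sequence[T]: Batches of the input sequence.
--
--     """
--     for i in range(0, len(seq), batch_size):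
--         yield seq[i : i + batch_size]
--
-- def bucket_batch_iter(
--     data: list[T], batch_size: int, descending: bool = True
-- ) -> Generator[tuple[list[T], list[int]], None, None]:
--     """Iterate over data in batches, sorted by length.
--
--     This function sorts the input data by length, then yields batches of the specified size.
--     It's useful for processing sequences of varying lengths efficiently.
--
--     Args:
--     ----
--         data (List[T]): List of items to batch.
--         batch_size (int): Number of items per batch.
--         descending (bool): If True, sort by length in descending order. Defaults to True.
--
--     Yields:
--     ------
--         Tuple[List[T], List[int]]: A tuple containing a batch of items and their original indices.
--
--     """
--     if len(data) <= batch_size: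
--         yield data, list(range(len(data)))
--         return
--
--     data_with_indices = sorted(enumerate(data), key=lambda x: len(x[1]), reverse=descending)
--     for batch in batch_iter(data_with_indices, batch_size):
--         indices, items = zip(*batch)
--         yield list(items), list(indices)
-- ===== SOURCE B (Python) =====
-- def bucket_batch_iter(data, batch_size, descending=True):
--     """Bucket items by length in one dict pass (no comparison sort of the
--     items); only the distinct lengths are sorted, then buckets are
--     concatenated (stable: indices stay in original order within a length)
--     and the index order is sliced into batches."""
--     n = len(data)
--     if n <= batch_size:
--         yield data, list(range(n))
--         return
--     buckets = {}
--     for i, item in enumerate(data):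
--         buckets.setdefault(len(item), []).append(i)
--     order = [i for length in sorted(buckets, reverse=descending) for i in buckets[length]]
--     for s in range(0, n, batch_size):
--         idx = order[s:s + batch_size]
--         yield [data[j] for j in idx], idx
-- ===== Notes on version B (the rewrite author's own statement) =====
-- stated objective: faster
-- what changed: B replaces the comparison sort of (index,item) pairs by a bucket sort: one dict pass groups indices by length, only the k distinct lengths are comparison-sorted, and the buckets are concatenated (stability comes for free) before slicing into batches.
import Mathlib
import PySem

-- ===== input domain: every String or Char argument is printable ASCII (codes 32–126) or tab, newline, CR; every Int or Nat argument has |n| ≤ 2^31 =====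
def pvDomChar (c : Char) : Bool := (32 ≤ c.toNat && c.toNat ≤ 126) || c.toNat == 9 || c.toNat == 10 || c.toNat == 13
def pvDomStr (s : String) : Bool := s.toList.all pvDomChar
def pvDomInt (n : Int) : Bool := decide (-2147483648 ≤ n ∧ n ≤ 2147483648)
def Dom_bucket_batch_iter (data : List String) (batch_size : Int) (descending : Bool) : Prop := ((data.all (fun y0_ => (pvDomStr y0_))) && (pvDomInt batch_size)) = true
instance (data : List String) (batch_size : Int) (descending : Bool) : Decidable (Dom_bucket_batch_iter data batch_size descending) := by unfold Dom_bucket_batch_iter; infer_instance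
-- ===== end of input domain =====

-- B replaces A's comparison sort of (index, item) pairs by a bucket sort: one dict pass
-- groups indices by length, only the distinct lengths are sorted, and the buckets are
-- concatenated (stability is automatic) before slicing into batches.
-- Both Pythons are generators; the ports return the list of yielded pairs.

-- ===== PORT A =====
-- helper batch_iter(seq, batch_size): yields seq[i:i+batch_size] for i in range(0, len(seq), batch_size)
def pvBatchIter {α : Type} (seq : List α) (batch_size : Int) : List (List α) :=
  (PySem.List.pyRange 0 (seq.length : Int) batch_size).foldl
    (fun acc i => acc ++ [PySem.List.slice seq (some i) (some (i + batch_size))]) []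

def bucket_batch_iter (data : List String) (batch_size : Int) (descending : Bool) : List (List String × List Int) :=
  if (data.length : Int) ≤ batch_size then
    [(data, PySem.List.pyRange 0 (data.length : Int) 1)]
  else
    let data_with_indices :=
      PySem.List.sorted (PySem.List.enumerate data) (fun x => PySem.Str.len x.2) descending
    -- 'indices, items = zip(*batch)': each batch yielded here is a nonempty list of pairs
    -- (batch_size > 0 on every iteration that yields), so the unpack is the two projections
    (pvBatchIter data_with_indices batch_size).foldl
      (fun acc batch => acc ++ [(batch.map (·.2), batch.map (·.1))]) []

-- ===== PORT B =====
def bucket_batch_iter_alt (data : List String) (batch_size : Int) (descending : Bool) : List (List String × List Int) :=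
  let n := data.length
  if (n : Int) ≤ batch_size then
    [(data, PySem.List.pyRange 0 (n : Int) 1)]
  else
    -- buckets = {}; for i, item in enumerate(data): buckets.setdefault(len(item), []).append(i)
    let buckets : PySem.Dict Int (List Int) :=
      (PySem.List.enumerate data).foldl
        (fun d p => d.modify (PySem.Str.len p.2) [] (fun cur => cur ++ [p.1])) PySem.Dict.empty
    -- order = [i for length in sorted(buckets, reverse=descending) for i in buckets[length]]
    let order : List Int :=
      (PySem.List.sorted buckets.keys (fun L => L) descending).flatMap
        (fun L => buckets.getD L [])
    (PySem.List.pyRange 0 (n : Int) batch_size).foldl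
      (fun acc s =>
        let idx := PySem.List.slice order (some s) (some (s + batch_size))
        acc ++ [(idx.map (fun j => PySem.List.pyGetD data j ""), idx)]) []

-- ===== PRECONDITION & SPEC =====
-- Pre_ excludes batch_size = 0 with nonempty data: there range(0, n, 0) makes BOTH programs raise ValueError.
def Pre_bucket_batch_iter (data : List String) (batch_size : Int) (descending : Bool) : Prop :=
  batch_size ≠ 0 ∨ data = []
instance (data : List String) (batch_size : Int) (descending : Bool) : Decidable (Pre_bucket_batch_iter data batch_size descending) := by unfold Pre_bucket_batch_iter; infer_instance

def pvWitness_bucket_batch_iter : List String × Int × Bool := (["aa", "b", "ccc"], 2, true)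

def Spec_bucket_batch_iter (data : List String) (batch_size : Int) (descending : Bool) (out : List (List String × List Int)) : Prop := out = bucket_batch_iter_alt data batch_size descending
instance (data : List String) (batch_size : Int) (descending : Bool) (out : List (List String × List Int)) : Decidable (Spec_bucket_batch_iter data batch_size descending out) := by unfold Spec_bucket_batch_iter; infer_instance

-- ===== CLAIM (what is proved, stated in full; the proofs are below) =====
def Claim_equal_bucket_batch_iter : Prop := ∀ (data : List String) (batch_size : Int) (descending : Bool), Dom_bucket_batch_iter data batch_size descending → Pre_bucket_batch_iter data batch_size descending → Spec_bucket_batch_iter data batch_size descending (bucket_batch_iter data batch_size descending)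

-- ===== LEMMAS AND PROOFS =====

-- insertBy skips a block of elements it does not go before
theorem pvInsertBy_pass {α : Type} (b : α → α → Bool) (x : α) :
    ∀ (l zs : List α), (∀ y ∈ l, b x y = false) →
      PySem.List.insertBy b x (l ++ zs) = l ++ PySem.List.insertBy b x zs := by
  intro l
  induction l with
  | nil => intro zs _; simp
  | cons y l ih =>
      intro zs h
      have hy : b x y = false := h y (by simp)
      simp only [List.cons_append, PySem.List.insertBy, hy]
      simp [ih zs (fun z hz => h z (by simp [hz]))]

-- insertBy prepends when it goes before everything
theorem pvInsertBy_front {α : Type} (b : α → α → Bool) (x : α) (zs : List α)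
    (h : ∀ y ∈ zs, b x y = true) : PySem.List.insertBy b x zs = x :: zs := by
  cases zs with
  | nil => rfl
  | cons y zs => simp [PySem.List.insertBy, h y (by simp)]

theorem pvInsertBy_cons {α : Type} (b : α → α → Bool) (x y : α) (ys : List α) :
    PySem.List.insertBy b x (y :: ys)
      = if b x y then x :: y :: ys else y :: PySem.List.insertBy b x ys := rfl

theorem pvInsertBy_nil {α : Type} (b : α → α → Bool) (x : α) :
    PySem.List.insertBy b x [] = [x] := rfl

-- inserting an element into a concatenation of key-homogeneous, strictly c-ordered,
-- nonempty buckets appends it to its bucket (or creates the bucket at its sorted place)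
theorem pvInsertBy_flatMap {α : Type} (c : Int → Int → Bool) (key : α → Int) (x : α)
    (f : Int → List α)
    (hirr : ∀ u, c u u = false)
    (hasym : ∀ u v, c u v = true → c v u = false) :
    ∀ (Ks : List Int),
      Ks.Pairwise (fun a b => c a b = true) →
      (∀ L ∈ Ks, ∀ y ∈ f L, key y = L) →
      (∀ L ∈ Ks, f L ≠ []) →
      (key x ∉ Ks → f (key x) = []) →
      PySem.List.insertBy (fun a y => c (key a) (key y)) x (Ks.flatMap f)
        = (if key x ∈ Ks then Ks else PySem.List.insertBy c (key x) Ks).flatMap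
            (fun L => f L ++ if key x == L then [x] else []) := by
  intro Ks
  induction Ks with
  | nil =>
      intro _ _ _ hmiss
      simp [pvInsertBy_nil, hmiss (by simp)]
  | cons K Ks ih =>
      intro hp hf hne hmiss
      have hKr : ∀ b ∈ Ks, c K b = true := (List.pairwise_cons.mp hp).1
      have hp' := (List.pairwise_cons.mp hp).2
      cases hcK : c (key x) K with
      | true =>
        -- new bucket strictly before K
        have hxK : key x ≠ K := by
          intro h; rw [h, hirr] at hcK; exact Bool.false_ne_true hcK
        have hnotin : key x ∉ K :: Ks := by
          intro h
          rcases List.mem_cons.mp h with h | h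
          · exact hxK h
          · rw [hasym _ _ (hKr _ h)] at hcK; exact Bool.false_ne_true hcK
        have hfx : f (key x) = [] := hmiss hnotin
        -- LHS: f K is nonempty, its head has key K, so x is prepended
        obtain ⟨y, l', hKl⟩ : ∃ y l', f K = y :: l' := by
          rcases hfk : f K with _ | ⟨y, l'⟩
          · exact absurd hfk (hne K (by simp))
          · exact ⟨_, _, rfl⟩
        have hkey : key y = K := hf K (by simp) y (by rw [hKl]; simp)
        have hcong : (K :: Ks).flatMap (fun L => f L ++ if key x == L then [x] else [])
            = (K :: Ks).flatMap f := by
          apply List.flatMap_congr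
          intro L hL
          have : key x ≠ L := fun h => hnotin (h ▸ hL)
          simp [this]
        rw [if_neg hnotin, pvInsertBy_cons, if_pos hcK]
        conv_rhs => rw [List.flatMap_cons]
        rw [hcong, hfx]
        simp only [beq_self_eq_true, if_pos, List.nil_append]
        rw [List.flatMap_cons, hKl]
        simp [pvInsertBy_cons, hkey, hcK]
      | false =>
        by_cases hxK : key x = K
        · -- append to bucket K
          subst hxK
          have hKKs : key x ∉ Ks := by
            intro h
            have h2 := hKr _ h
            rw [hirr] at h2
            exact Bool.false_ne_true h2
          have hpassK : ∀ y ∈ f (key x), c (key x) (key y) = false := by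
            intro y hy
            rw [hf (key x) (by simp) y hy]
            exact hirr (key x)
          have hfront : ∀ y ∈ Ks.flatMap f, c (key x) (key y) = true := by
            intro y hy
            rcases List.mem_flatMap.mp hy with ⟨L, hL, hyL⟩
            rw [hf L (by simp [hL]) y hyL]
            exact hKr _ hL
          simp only [List.flatMap_cons]
          rw [pvInsertBy_pass _ _ _ _ hpassK, pvInsertBy_front _ _ _ hfront]
          rw [if_pos (by simp : key x ∈ key x :: Ks)]
          have hcong : Ks.flatMap (fun L => f L ++ if key x == L then [x] else [])
              = Ks.flatMap f := by
            apply List.flatMap_congr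
            intro L hL
            have : key x ≠ L := fun h => hKKs (h ▸ hL)
            simp [this]
          simp only [List.flatMap_cons, beq_self_eq_true, if_pos, hcong]
          simp
        · -- x's key goes strictly after K: skip bucket K and recurse
          have hpassK : ∀ y ∈ f K, c (key x) (key y) = false := by
            intro y hy
            rw [hf K (by simp) y hy]
            exact hcK
          simp only [List.flatMap_cons]
          rw [pvInsertBy_pass _ _ _ _ hpassK]
          rw [ih hp' (fun L hL => hf L (by simp [hL])) (fun L hL => hne L (by simp [hL]))
            (fun h => hmiss (by simp [hxK, h]))]
          have hxne : (key x == K) = false := by simp [hxK]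
          by_cases hmem : key x ∈ Ks
          · rw [if_pos hmem, if_pos (by simp [hmem])]
            simp [hxK]
          · rw [if_neg hmem, if_neg (by simp [hxK, hmem])]
            rw [pvInsertBy_cons, if_neg (by simp [hcK])]
            simp [hxK]

-- membership in an insertBy fold
theorem pvMem_foldl_insertBy {κ : Type} (c : κ → κ → Bool) :
    ∀ (ks acc : List κ) (y : κ),
      (y ∈ ks.foldl (fun acc k => PySem.List.insertBy c k acc) acc) ↔ (y ∈ ks ∨ y ∈ acc) := by
  intro ks
  induction ks with
  | nil => simp
  | cons k ks ih =>
      intro acc y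
      simp only [List.foldl_cons, ih, PySem.List.mem_insertBy]
      constructor
      · rintro (h | h | h) <;> simp [h]
      · intro h
        rcases h with h | h
        · rcases List.mem_cons.mp h with h | h
          · exact Or.inr (Or.inl h)
          · exact Or.inl h
        · exact Or.inr (Or.inr h)

-- insertBy of a fresh element preserves strict pairedness (c transitive and total)
theorem pvPairwise_insertBy {κ : Type} (c : κ → κ → Bool)
    (htrans : ∀ u v w, c u v = true → c v w = true → c u w = true)
    (htot : ∀ u v, u ≠ v → c u v = true ∨ c v u = true) (k : κ) :
    ∀ (acc : List κ), acc.Pairwise (fun a b => c a b = true) → k ∉ acc →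
      (PySem.List.insertBy c k acc).Pairwise (fun a b => c a b = true) := by
  intro acc
  induction acc with
  | nil => intro _ _; simp [pvInsertBy_nil]
  | cons y acc ih =>
      intro hp hk
      have hy : ∀ z ∈ acc, c y z = true := (List.pairwise_cons.mp hp).1
      have hp' := (List.pairwise_cons.mp hp).2
      rw [pvInsertBy_cons]
      by_cases hc : c k y = true
      · rw [if_pos hc]
        refine List.pairwise_cons.mpr ⟨?_, hp⟩
        intro z hz
        rcases List.mem_cons.mp hz with h | h
        · exact h ▸ hc
        · exact htrans _ _ _ hc (hy z h)
      · rw [if_neg hc]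
        refine List.pairwise_cons.mpr ⟨?_, ih hp' (fun h => hk (by simp [h]))⟩
        intro z hz
        rcases (PySem.List.mem_insertBy c k z acc).mp hz with h | h
        · subst h
          have hne : y ≠ z := fun h => hk (by simp [h])
          rcases htot _ _ hne with h | h
          · exact h
          · exact absurd h (by simp [hc])
        · exact hy z h

-- folding insertBy over a Nodup list yields a strictly c-ordered list
theorem pvPairwise_foldl_insertBy {κ : Type} (c : κ → κ → Bool)
    (htrans : ∀ u v w, c u v = true → c v w = true → c u w = true)
    (htot : ∀ u v, u ≠ v → c u v = true ∨ c v u = true) :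
    ∀ (ks acc : List κ), ks.Nodup → acc.Pairwise (fun a b => c a b = true) →
      (∀ y ∈ ks, y ∉ acc) →
      (ks.foldl (fun acc k => PySem.List.insertBy c k acc) acc).Pairwise
        (fun a b => c a b = true) := by
  intro ks
  induction ks with
  | nil => intro acc _ hp _; exact hp
  | cons k ks ih =>
      intro acc hnd hp hfr
      simp only [List.foldl_cons]
      refine ih _ (List.nodup_cons.mp hnd).2
        (pvPairwise_insertBy c htrans htot k acc hp (hfr k (by simp))) ?_
      intro y hy hmem
      rcases (PySem.List.mem_insertBy c k y acc).mp hmem with h | h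
      · exact (List.nodup_cons.mp hnd).1 (h ▸ hy)
      · exact hfr y (by simp [hy]) h

-- the stable-sort/bucket decomposition, stated on the insertBy folds (abstract comparator)
theorem pvFoldl_buckets {α : Type} (c : Int → Int → Bool) (key : α → Int)
    (hirr : ∀ u, c u u = false)
    (htrans : ∀ u v w, c u v = true → c v w = true → c u w = true)
    (hasym : ∀ u v, c u v = true → c v u = false)
    (htot : ∀ u v, u ≠ v → c u v = true ∨ c v u = true) :
    ∀ xs : List α,
      xs.foldl (fun acc x => PySem.List.insertBy (fun a y => c (key a) (key y)) x acc) []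
        = ((PySem.Set.ofList (xs.map key)).foldl
            (fun acc L => PySem.List.insertBy c L acc) []).flatMap
            (fun L => xs.filter (fun y => key y == L)) := by
  intro xs
  induction xs using List.reverseRecOn with
  | nil => simp [PySem.Set.ofList, PySem.Set.empty]
  | append_singleton ys x ih =>
      set SK := (PySem.Set.ofList (ys.map key)).foldl
        (fun acc L => PySem.List.insertBy c L acc) [] with hSK
      have hmemSK : ∀ L, L ∈ SK ↔ L ∈ ys.map key := by
        intro L
        rw [hSK, pvMem_foldl_insertBy, PySem.Set.mem_ofList]
        simp
      have hpairSK : SK.Pairwise (fun a b => c a b = true) := by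
        rw [hSK]
        exact pvPairwise_foldl_insertBy c htrans htot _ []
          (PySem.Set.nodup_ofList _) (by simp) (by simp)
      rw [List.foldl_append, List.foldl_cons, List.foldl_nil, ih]
      rw [pvInsertBy_flatMap c key x _ hirr hasym SK hpairSK
        (fun L _ y hy => by
          have := List.of_mem_filter hy
          exact eq_of_beq this)
        (fun L hL => by
          rcases List.mem_map.mp ((hmemSK L).mp hL) with ⟨y, hy, hky⟩
          intro hnil
          have : y ∈ ys.filter (fun y => key y == L) :=
            List.mem_filter.mpr ⟨hy, by simp [hky]⟩
          rw [hnil] at this; exact absurd this (by simp))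
        (fun hnot => by
          apply List.filter_eq_nil_iff.mpr
          intro y hy hbeq
          exact hnot ((hmemSK _).mpr (List.mem_map.mpr ⟨y, hy, eq_of_beq hbeq⟩)))]
      -- rewrite the right-hand side to the (ys ++ [x]) form
      have hbucket : ∀ L, (ys ++ [x]).filter (fun y => key y == L)
          = ys.filter (fun y => key y == L) ++ if key x == L then [x] else [] := by
        intro L
        rw [List.filter_append]
        by_cases h : key x = L <;> simp [h]
      have hkeys : PySem.Set.ofList ((ys ++ [x]).map key)
          = PySem.Set.add (PySem.Set.ofList (ys.map key)) (key x) := by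
        rw [List.map_append, PySem.Set.ofList_eq_foldl, List.foldl_append,
          ← PySem.Set.ofList_eq_foldl]
        simp
      rw [hkeys]
      by_cases hmem : key x ∈ SK
      · have hcont : PySem.Set.contains (PySem.Set.ofList (ys.map key)) (key x) = true := by
          have : key x ∈ PySem.Set.ofList (ys.map key) :=
            (PySem.Set.mem_ofList _ _).mpr ((hmemSK _).mp hmem)
          exact (PySem.Set.contains_iff _ _).mpr this
        rw [if_pos hmem]
        unfold PySem.Set.add
        rw [if_pos hcont]
        rw [← hSK]
        exact List.flatMap_congr (fun L _ => (hbucket L).symm)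
      · have hcont : PySem.Set.contains (PySem.Set.ofList (ys.map key)) (key x) = false := by
          have : key x ∉ PySem.Set.ofList (ys.map key) :=
            fun h => hmem ((hmemSK _).mpr ((PySem.Set.mem_ofList _ _).mp h))
          exact Bool.eq_false_iff.mpr (fun hc => this ((PySem.Set.contains_iff _ _).mp hc))
        rw [if_neg hmem]
        unfold PySem.Set.add
        rw [if_neg (by simp only [hcont]; simp)]
        rw [List.foldl_append, List.foldl_cons, List.foldl_nil, ← hSK]
        exact List.flatMap_congr (fun L _ => (hbucket L).symm)

-- a Python stable sort by key is the concatenation of its key-buckets in sorted key order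
theorem pvSorted_buckets {α : Type} (key : α → Int) (rev : Bool) (xs : List α) :
    PySem.List.sorted xs key rev
      = (PySem.List.sorted (PySem.Set.ofList (xs.map key)) (fun L => L) rev).flatMap
          (fun L => xs.filter (fun y => key y == L)) := by
  cases rev
  · rw [PySem.List.sorted_eq_foldl_insertBy, PySem.List.sorted_eq_foldl_insertBy]
    exact pvFoldl_buckets (fun a b => decide (a < b)) key
      (fun u => by simp) (fun u v w hu hv => by simp_all; omega)
      (fun u v h => by simp_all; omega) (fun u v h => by simp; omega) xs
  · rw [PySem.List.sorted_rev_eq_foldl_insertBy, PySem.List.sorted_rev_eq_foldl_insertBy]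
    exact pvFoldl_buckets (fun a b => decide (b < a)) key
      (fun u => by simp) (fun u v w hu hv => by simp_all; omega)
      (fun u v h => by simp_all; omega) (fun u v h => by simp; omega) xs

-- slice commutes with map
theorem pvSlice_map {α β : Type} (f : α → β) (xs : List α) (a? b? : Option Int) :
    PySem.List.slice (xs.map f) a? b? = (PySem.List.slice xs a? b?).map f := by
  simp [PySem.List.slice]

-- B's dict of buckets: lookup of a length L is the list of indices whose item has length L
theorem pvBuckets_getD (data : List String) (L : Int) :
    ((PySem.List.enumerate data).foldl
      (fun d p => d.modify (PySem.Str.len p.2) [] (fun cur => cur ++ [p.1]))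
      PySem.Dict.empty).getD L []
    = ((PySem.List.enumerate data).filter (fun p => PySem.Str.len p.2 == L)).map (·.1) := by
  have hmap : ((PySem.List.enumerate data).map
        (fun p : Int × String => (PySem.Str.len p.2, p.1))).foldl
      (fun d (q : Int × Int) => d.modify q.1 [] (fun cur => cur ++ [q.2])) PySem.Dict.empty
      = (PySem.List.enumerate data).foldl
        (fun d p => d.modify (PySem.Str.len p.2) [] (fun cur => cur ++ [p.1]))
        PySem.Dict.empty := List.foldl_map
  rw [← hmap, PySem.Dict.getD_foldl_modify_append, List.filter_map]
  simp [List.map_map, Function.comp_def]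

-- B's dict of buckets: its keys are the distinct lengths in first-occurrence order
theorem pvBuckets_keys (data : List String) :
    ((PySem.List.enumerate data).foldl
      (fun d p => d.modify (PySem.Str.len p.2) [] (fun cur => cur ++ [p.1]))
      PySem.Dict.empty).keys
    = PySem.Set.ofList ((PySem.List.enumerate data).map (fun p => PySem.Str.len p.2)) := by
  rw [PySem.Dict.keys_foldl_modify_key (PySem.List.enumerate data)
    (fun p : Int × String => PySem.Str.len p.2) [] (fun _ p => (fun cur => cur ++ [p.1]))
    PySem.Dict.empty]
  rw [PySem.Set.ofList_eq_foldl]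
  simp [PySem.Set.update]

-- ===== VERDICT (by name: the statement is the Claim_ definition above) =====
theorem bucket_batch_iter_spec : Claim_equal_bucket_batch_iter := by
  intro data batch_size descending _ _
  unfold Spec_bucket_batch_iter bucket_batch_iter bucket_batch_iter_alt pvBatchIter
  by_cases h : (data.length : Int) ≤ batch_size
  · simp [h]
  · simp only [h, if_false]
    have hEmap : PySem.List.enumerate data
        = (PySem.List.pyRange 0 (data.length : Int) 1).map
            (fun j => (j, PySem.List.pyGetD data j "")) := by
      have := PySem.List.enumerate_eq_map_pyRange data ""
      simpa [PySem.List.len_eq] using this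
    -- the common sorted key list
    set SKeys := PySem.List.sorted
      (PySem.Set.ofList ((PySem.List.enumerate data).map (fun p => PySem.Str.len p.2)))
      (fun L => L) descending with hSKeys
    -- the common index order
    set O := SKeys.flatMap
      (fun L => (PySem.List.pyRange 0 (data.length : Int) 1).filter
        (fun j => PySem.Str.len (PySem.List.pyGetD data j "") == L)) with hO
    -- buckets of pairs are buckets of indices, paired up
    have hfilter : ∀ L, (PySem.List.enumerate data).filter (fun p => PySem.Str.len p.2 == L)
        = ((PySem.List.pyRange 0 (data.length : Int) 1).filter
            (fun j => PySem.Str.len (PySem.List.pyGetD data j "") == L)).map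
            (fun j => (j, PySem.List.pyGetD data j "")) := by
      intro L
      rw [hEmap, List.filter_map]
      rfl
    -- A's sorted pair list is O, paired up
    have hS : PySem.List.sorted (PySem.List.enumerate data)
        (fun x => PySem.Str.len x.2) descending
        = O.map (fun j => (j, PySem.List.pyGetD data j "")) := by
      rw [pvSorted_buckets (fun x : Int × String => PySem.Str.len x.2) descending]
      rw [hO, List.map_flatMap, ← hSKeys]
      exact List.flatMap_congr (fun L _ => hfilter L)
    -- B's order is O
    have hOrder : (PySem.List.sorted
          ((PySem.List.enumerate data).foldl
            (fun d p => d.modify (PySem.Str.len p.2) [] (fun cur => cur ++ [p.1]))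
            PySem.Dict.empty).keys (fun L => L) descending).flatMap
          (fun L => ((PySem.List.enumerate data).foldl
            (fun d p => d.modify (PySem.Str.len p.2) [] (fun cur => cur ++ [p.1]))
            PySem.Dict.empty).getD L []) = O := by
      rw [hO]
      rw [pvBuckets_keys, ← hSKeys]
      refine List.flatMap_congr (fun L _ => ?_)
      rw [pvBuckets_getD, hfilter L, List.map_map]
      simp [Function.comp_def]
    rw [hOrder]
    have hlen : ((PySem.List.sorted (PySem.List.enumerate data)
        (fun x => PySem.Str.len x.2) descending).length : Int) = (data.length : Int) := by
      rw [PySem.List.length_sorted, PySem.List.length_enumerate]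
    rw [hlen, hS]
    rw [PySem.List.foldl_append_singleton_eq_map
      (f := fun i => PySem.List.slice (O.map (fun j => (j, PySem.List.pyGetD data j "")))
        (some i) (some (i + batch_size)))]
    rw [PySem.List.foldl_append_singleton_eq_map
      (f := fun batch : List (Int × String) => (batch.map (·.2), batch.map (·.1)))]
    rw [PySem.List.foldl_append_singleton_eq_map
      (f := fun s =>
        ((PySem.List.slice O (some s) (some (s + batch_size))).map
          (fun j => PySem.List.pyGetD data j ""),
         PySem.List.slice O (some s) (some (s + batch_size))))]
    simp only [List.nil_append, List.map_map]
    refine List.map_congr_left (fun i _ => ?_)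
    simp [pvSlice_map, List.map_map, Function.comp_def]
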